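-- pv_equiv track=rewrite | github.com/madgik/detexa | WorkflowBuilder/backend.py | split_udfs_and_query
-- ===== SOURCE A (Python) =====
-- def split_udfs_and_query(code: str):
--     lines = code.strip().splitlines()
--     udfs = []
--     query = []
--     in_query = False
--
--     for line in lines:
--         if line.strip().startswith("-- YeSQL Query"):
--             in_query = True
--         if in_query:
--             query.append(line)
--         else:
--             udfs.append(line)
--
--     return "\n".join(udfs), "\n".join(query)
-- ===== SOURCE B (Python) =====
-- def split_udfs_and_query(code: str):
--     lines = code.strip().splitlines()
--     for i, line in enumerate(lines):
--         if line.strip().startswith("-- YeSQL Query"):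
--             return "\n".join(lines[:i]), "\n".join(lines[i:])
--     return "\n".join(lines), ""
-- ===== Notes on version B (the rewrite author's own statement) =====
-- stated objective: simpler
-- what changed: Replaces the flag-driven per-line accumulation into two lists with a search for the first marker line followed by two slices and an early return.
import Mathlib
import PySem

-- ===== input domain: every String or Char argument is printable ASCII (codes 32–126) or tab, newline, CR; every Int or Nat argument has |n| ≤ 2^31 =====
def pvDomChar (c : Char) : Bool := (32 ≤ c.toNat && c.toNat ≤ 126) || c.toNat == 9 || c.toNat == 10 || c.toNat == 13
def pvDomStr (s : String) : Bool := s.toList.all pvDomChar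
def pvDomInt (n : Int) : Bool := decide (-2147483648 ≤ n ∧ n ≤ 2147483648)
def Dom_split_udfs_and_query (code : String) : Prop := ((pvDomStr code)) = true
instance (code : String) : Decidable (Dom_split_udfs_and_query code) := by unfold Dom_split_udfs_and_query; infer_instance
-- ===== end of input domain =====

-- B replaces A's flag-driven per-line accumulation with a search for the first
-- marker line followed by two slices (objective: simpler).


-- ===== PORT A =====
-- the marker test applied to one line
def pvMarker (line : String) : Bool :=
  PySem.Str.startswith (PySem.Str.strip line) "-- YeSQL Query"

-- one iteration of A's for-loop over state (udfs, query, in_query)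
def pvStepA (st : List String × List String × Bool) (line : String) :
    List String × List String × Bool :=
  let inq := if pvMarker line then true else st.2.2
  if inq then (st.1, st.2.1 ++ [line], inq) else (st.1 ++ [line], st.2.1, inq)

def split_udfs_and_query (code : String) : String × String :=
  let lines := PySem.Str.splitlines (PySem.Str.strip code)
  let st := lines.foldl pvStepA ([], [], false)
  (PySem.Str.join "\n" st.1, PySem.Str.join "\n" st.2.1)

-- ===== PORT B =====
def split_udfs_and_query_alt (code : String) : String × String :=
  let lines := PySem.Str.splitlines (PySem.Str.strip code)
  match lines.findIdx? pvMarker with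
  | some i => (PySem.Str.join "\n" (lines.take i), PySem.Str.join "\n" (lines.drop i))
  | none => (PySem.Str.join "\n" lines, "")

-- ===== PRECONDITION & SPEC =====
def Spec_split_udfs_and_query (code : String) (out : String × String) : Prop := out = split_udfs_and_query_alt code
instance (code : String) (out : String × String) : Decidable (Spec_split_udfs_and_query code out) := by unfold Spec_split_udfs_and_query; infer_instance

-- ===== CLAIM (what is proved, stated in full; the proofs are below) =====
def Claim_equal_split_udfs_and_query : Prop := ∀ (code : String), Dom_split_udfs_and_query code → Spec_split_udfs_and_query code (split_udfs_and_query code)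

-- ===== LEMMAS AND PROOFS =====

-- once the flag is true, every remaining line goes to query
lemma pvFoldA_true (lines : List String) (u q : List String) :
    lines.foldl pvStepA (u, q, true) = (u, q ++ lines, true) := by
  induction lines generalizing q with
  | nil => simp
  | cons l ls ih =>
      simp only [List.foldl_cons, pvStepA]
      split <;> simp [ih]

-- the loop from a false flag is the search-and-split of B
lemma pvFoldA_false (lines : List String) (u q : List String) :
    lines.foldl pvStepA (u, q, false) =
      match lines.findIdx? pvMarker with
      | some i => (u ++ lines.take i, q ++ lines.drop i, true)
      | none => (u ++ lines, q, false) := by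
  induction lines generalizing u with
  | nil => simp
  | cons l ls ih =>
      by_cases h : pvMarker l
      · simp [List.foldl_cons, pvStepA, h, pvFoldA_true, List.findIdx?_cons]
      · rw [List.foldl_cons, show pvStepA (u, q, false) l = (u ++ [l], q, false) by
          simp [pvStepA, h], ih (u ++ [l])]
        cases hf : ls.findIdx? pvMarker <;> simp [List.findIdx?_cons, h, hf]

-- ===== VERDICT (by name: the statement is the Claim_ definition above) =====
theorem split_udfs_and_query_spec : Claim_equal_split_udfs_and_query := by
  intro code _
  unfold Spec_split_udfs_and_query split_udfs_and_query split_udfs_and_query_alt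
  simp only [pvFoldA_false]
  cases h : (PySem.Str.splitlines (PySem.Str.strip code)).findIdx? pvMarker <;>
    simp [PySem.Str.join]
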